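-- pv_equiv track=rewrite | github.com/Everlin0706/PythonPC1 | PRACTICA1/Ejercicio12.py | obtener_tipo_mime
-- ===== SOURCE A (Python) =====
-- def obtener_tipo_mime(nombre_archivo):
--     # Diccionario de extensiones con sus tipos MIME correspondientes
--     tipos_mime = {
--         ".gif": "image/gif",
--         ".jpg": "image/jpeg",
--         ".jpeg": "image/jpeg",
--         ".png": "image/png",
--         ".pdf": "application/pdf",
--         ".txt": "text/plain",
--         ".zip": "application/zip"
--     }
--
--     # Convertimos el nombre de archivo a minúsculas para evitar problemas con mayúsculas/minúsculas
--     nombre_archivo = nombre_archivo.lower()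
--
--     # Verificamos si el archivo tiene una extensión conocida
--     for extension in tipos_mime:
--         if nombre_archivo.endswith(extension):
--             return tipos_mime[extension]
--
--     # Si no se encuentra la extensión, se devuelve el tipo por defecto
--     return "application/octet-stream"
-- ===== SOURCE B (Python) =====
-- def obtener_tipo_mime(nombre_archivo):
--     tipos_mime = {
--         ".gif": "image/gif",
--         ".jpg": "image/jpeg",
--         ".jpeg": "image/jpeg",
--         ".png": "image/png",
--         ".pdf": "application/pdf",
--         ".txt": "text/plain",
--         ".zip": "application/zip"
--     }
--     nombre = nombre_archivo.lower()
--     if "." not in nombre: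
--         return "application/octet-stream"
--     ext = "." + nombre.rsplit(".", 1)[1]
--     return tipos_mime.get(ext, "application/octet-stream")
-- ===== Notes on version B (the rewrite author's own statement) =====
-- stated objective: idiomatic
-- what changed: A scans all seven dictionary entries testing endswith on each; B extracts the extension after the last dot once (rsplit) and does a single dictionary lookup with a default.
import Mathlib
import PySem

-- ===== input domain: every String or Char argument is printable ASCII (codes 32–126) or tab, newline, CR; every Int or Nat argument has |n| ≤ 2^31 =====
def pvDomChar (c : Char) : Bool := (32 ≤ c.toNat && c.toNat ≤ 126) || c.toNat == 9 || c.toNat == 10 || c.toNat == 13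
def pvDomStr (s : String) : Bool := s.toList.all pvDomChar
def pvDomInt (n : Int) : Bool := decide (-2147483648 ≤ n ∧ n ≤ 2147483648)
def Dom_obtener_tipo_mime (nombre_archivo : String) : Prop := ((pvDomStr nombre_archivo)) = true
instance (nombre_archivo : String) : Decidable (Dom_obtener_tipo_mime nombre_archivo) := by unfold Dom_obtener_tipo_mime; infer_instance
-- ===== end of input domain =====

-- B replaces A's scan over all seven extensions with direct extraction of the
-- last-dot extension followed by one dictionary lookup (objective: idiomatic).

-- ===== PORT A =====
-- A's dict literal, in insertion order (A iterates over its keys).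
def pvMimeA : List (String × String) :=
  [(".gif", "image/gif"), (".jpg", "image/jpeg"), (".jpeg", "image/jpeg"),
   (".png", "image/png"), (".pdf", "application/pdf"), (".txt", "text/plain"),
   (".zip", "application/zip")]

-- `for extension in tipos_mime: if nombre_archivo.endswith(extension): return tipos_mime[extension]`
-- (tipos_mime[extension] is the value paired with the key being iterated).
def pvLoopA (t : String) : List (String × String) → String
  | [] => "application/octet-stream"
  | (e, m) :: rest => if PySem.Str.endswith t e then m else pvLoopA t rest

def obtener_tipo_mime (nombre_archivo : String) : String :=
  pvLoopA (PySem.Str.lower nombre_archivo) pvMimeA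

-- ===== PORT B =====
def pvMimeB : PySem.Dict String String :=
  PySem.Dict.ofList
    [(".gif", "image/gif"), (".jpg", "image/jpeg"), (".jpeg", "image/jpeg"),
     (".png", "image/png"), (".pdf", "application/pdf"), (".txt", "text/plain"),
     (".zip", "application/zip")]

def obtener_tipo_mime_alt (nombre_archivo : String) : String :=
  let nombre := PySem.Str.lower nombre_archivo
  if PySem.Str.isIn "." nombre = false then "application/octet-stream"
  else
    -- nombre.rsplit(".", 1)[1]: the part after the LAST '.' (hand port, exact here since '.' ∈ nombre)
    let after := (nombre.toList.reverse.takeWhile (fun c => c != '.')).reverse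
    -- ext = "." + after;  tipos_mime.get(ext, "application/octet-stream")
    PySem.Dict.getD pvMimeB (String.ofList ('.' :: after)) "application/octet-stream"

-- ===== PRECONDITION & SPEC =====
def Spec_obtener_tipo_mime (nombre_archivo : String) (out : String) : Prop := out = obtener_tipo_mime_alt nombre_archivo
instance (nombre_archivo : String) (out : String) : Decidable (Spec_obtener_tipo_mime nombre_archivo out) := by unfold Spec_obtener_tipo_mime; infer_instance

-- ===== CLAIM (what is proved, stated in full; the proofs are below) =====
def Claim_equal_obtener_tipo_mime : Prop := ∀ (nombre_archivo : String), Dom_obtener_tipo_mime nombre_archivo → Spec_obtener_tipo_mime nombre_archivo (obtener_tipo_mime nombre_archivo)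

-- ===== LEMMAS AND PROOFS =====

lemma ofList_inj {a b : List Char} : String.ofList a = String.ofList b ↔ a = b := by
  constructor
  · intro h; have := congrArg String.toList h; simpa using this
  · rintro rfl; rfl

-- A dot-free list satisfies the takeWhile predicate everywhere.
lemma takeWhile_of_no_dot {cs : List Char} (h : '.' ∉ cs) :
    cs.takeWhile (fun c => c != '.') = cs :=
  List.takeWhile_eq_self_iff.mpr (fun _c hc => bne_iff_ne.mpr (fun e => h (e ▸ hc)))

-- The first element surviving dropWhile fails the predicate.
lemma dropWhile_head_false {p : Char → Bool} {l xs : List Char} {x : Char}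
    (h : l.dropWhile p = x :: xs) : p x = false := by
  induction l with
  | nil => simp at h
  | cons a as ih =>
    rw [List.dropWhile_cons] at h
    by_cases hp : p a
    · exact ih (by simpa [hp] using h)
    · obtain ⟨rfl, -⟩ : a = x ∧ as = xs := by simpa [hp] using h
      simpa using hp

-- Ending in '.'::cs (cs dot-free) is exactly: some dot occurs, and the segment
-- after the last dot is cs.
lemma suffix_iff_lastdot {cs : List Char} (l : List Char)
    (hcs : '.' ∉ cs) (hl : '.' ∈ l) :
    ('.' :: cs <:+ l) ↔ (l.reverse.takeWhile (fun c => c != '.')).reverse = cs := by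
  constructor
  · rintro ⟨p, rfl⟩
    have hrev : (p ++ '.' :: cs).reverse = cs.reverse ++ '.' :: p.reverse := by simp
    rw [hrev, List.takeWhile_append]
    have h1 : cs.reverse.takeWhile (fun c => c != '.') = cs.reverse :=
      takeWhile_of_no_dot (by simpa using hcs)
    simp [h1]
  · intro h
    have htk : l.reverse.takeWhile (fun c => c != '.') = cs.reverse := by
      have := congrArg List.reverse h; simpa using this
    cases hdm : l.reverse.dropWhile (fun c => c != '.') with
    | nil =>
      exfalso
      have : l.reverse = cs.reverse := by
        rw [← List.takeWhile_append_dropWhile (p := fun c => c != '.') (l := l.reverse),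
            htk, hdm, List.append_nil]
      have : l = cs := by
        have := congrArg List.reverse this; simpa using this
      exact hcs (this ▸ hl)
    | cons x xs =>
      have hxe : x = '.' := by simpa using dropWhile_head_false hdm
      have hlrev : l.reverse = cs.reverse ++ '.' :: xs := by
        rw [← List.takeWhile_append_dropWhile (p := fun c => c != '.') (l := l.reverse),
            htk, hdm, hxe]
      have hle : l = xs.reverse ++ '.' :: cs := by
        have := congrArg List.reverse hlrev; simpa using this
      exact ⟨xs.reverse, hle.symm⟩

-- If l has no dot, it cannot end in '.'::cs.
lemma not_suffix_of_no_dot {cs l : List Char} (h : '.' ∉ l) :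
    ¬ ('.' :: cs <:+ l) := fun hs => h (hs.subset (List.mem_cons_self))

-- A's if-chain on the after-last-dot segment w is B's dictionary lookup of "."+w.
lemma dictChain (w : List Char) :
    (if w = ['g','i','f'] then "image/gif"
     else if w = ['j','p','g'] then "image/jpeg"
     else if w = ['j','p','e','g'] then "image/jpeg"
     else if w = ['p','n','g'] then "image/png"
     else if w = ['p','d','f'] then "application/pdf"
     else if w = ['t','x','t'] then "text/plain"
     else if w = ['z','i','p'] then "application/zip"
     else "application/octet-stream")
    = PySem.Dict.getD (PySem.Dict.mk
        [(".gif", "image/gif"), (".jpg", "image/jpeg"), (".jpeg", "image/jpeg"),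
         (".png", "image/png"), (".pdf", "application/pdf"), (".txt", "text/plain"),
         (".zip", "application/zip")]) (String.ofList ('.' :: w)) "application/octet-stream" := by
  simp only [PySem.Dict.getD_eq_get?_getD, PySem.Dict.get?_mk_cons, beq_iff_eq,
    show (".gif" : String) = String.ofList ['.','g','i','f'] from rfl,
    show (".jpg" : String) = String.ofList ['.','j','p','g'] from rfl,
    show (".jpeg" : String) = String.ofList ['.','j','p','e','g'] from rfl,
    show (".png" : String) = String.ofList ['.','p','n','g'] from rfl,
    show (".pdf" : String) = String.ofList ['.','p','d','f'] from rfl,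
    show (".txt" : String) = String.ofList ['.','t','x','t'] from rfl,
    show (".zip" : String) = String.ofList ['.','z','i','p'] from rfl,
    ofList_inj,
    show ((['.','g','i','f'] : List Char) = '.' :: w) ↔ w = ['g','i','f'] by
      simp [List.cons.injEq, eq_comm],
    show ((['.','j','p','g'] : List Char) = '.' :: w) ↔ w = ['j','p','g'] by
      simp [List.cons.injEq, eq_comm],
    show ((['.','j','p','e','g'] : List Char) = '.' :: w) ↔ w = ['j','p','e','g'] by
      simp [List.cons.injEq, eq_comm],
    show ((['.','p','n','g'] : List Char) = '.' :: w) ↔ w = ['p','n','g'] by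
      simp [List.cons.injEq, eq_comm],
    show ((['.','p','d','f'] : List Char) = '.' :: w) ↔ w = ['p','d','f'] by
      simp [List.cons.injEq, eq_comm],
    show ((['.','t','x','t'] : List Char) = '.' :: w) ↔ w = ['t','x','t'] by
      simp [List.cons.injEq, eq_comm],
    show ((['.','z','i','p'] : List Char) = '.' :: w) ↔ w = ['z','i','p'] by
      simp [List.cons.injEq, eq_comm]]
  split_ifs <;> rfl

theorem obtener_tipo_mime_eq (s : String) :
    obtener_tipo_mime s = obtener_tipo_mime_alt s := by
  simp only [obtener_tipo_mime, obtener_tipo_mime_alt, pvLoopA, pvMimeA,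
    show (".gif" : String) = String.ofList ['.','g','i','f'] from rfl,
    show (".jpg" : String) = String.ofList ['.','j','p','g'] from rfl,
    show (".jpeg" : String) = String.ofList ['.','j','p','e','g'] from rfl,
    show (".png" : String) = String.ofList ['.','p','n','g'] from rfl,
    show (".pdf" : String) = String.ofList ['.','p','d','f'] from rfl,
    show (".txt" : String) = String.ofList ['.','t','x','t'] from rfl,
    show (".zip" : String) = String.ofList ['.','z','i','p'] from rfl]
  set t := PySem.Str.lower s with ht
  set l := t.toList with hl
  have hends : ∀ cs : List Char,
      PySem.Str.endswith t (String.ofList cs) = true ↔ cs <:+ l := by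
    intro cs
    have hx : (String.ofList cs).toList = cs := by simp
    rw [PySem.Str.endswith_eq, PySem.Chars.endswith_iff, hx]
  by_cases hdot : '.' ∈ l
  · -- there is a dot: both sides are determined by the segment after the last dot
    have hisin : PySem.Chars.isIn ['.'] t.toList = true := by
      rw [PySem.Chars.isIn_iff_infix]
      simpa [List.singleton_infix_iff] using hdot
    have hcond : ¬ (PySem.Str.isIn "." t = false) := by simp [hisin]
    rw [if_neg hcond]
    set w := (l.reverse.takeWhile (fun c => c != '.')).reverse with hw
    have key : ∀ cs : List Char, '.' ∉ cs →
        ∀ m m' : String, (if PySem.Str.endswith t (String.ofList ('.' :: cs)) then m else m')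
          = (if w = cs then m else m') := by
      intro cs hcs m m'
      by_cases hcase : w = cs
      · rw [if_pos hcase, if_pos ((hends _).mpr ((suffix_iff_lastdot l hcs hdot).mpr hcase))]
      · rw [if_neg hcase, if_neg]
        intro hsuf
        exact hcase ((suffix_iff_lastdot l hcs hdot).mp ((hends _).mp hsuf))
    rw [key ['g','i','f'] (by decide), key ['j','p','g'] (by decide),
        key ['j','p','e','g'] (by decide), key ['p','n','g'] (by decide),
        key ['p','d','f'] (by decide), key ['t','x','t'] (by decide),
        key ['z','i','p'] (by decide)]
    -- the dict lookup unfolds to the same chain of comparisons on w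
    have hmk : pvMimeB = PySem.Dict.mk
        [(".gif", "image/gif"), (".jpg", "image/jpeg"), (".jpeg", "image/jpeg"),
         (".png", "image/png"), (".pdf", "application/pdf"), (".txt", "text/plain"),
         (".zip", "application/zip")] := by decide
    rw [hmk]
    exact dictChain w
  · -- no dot anywhere: every endswith test fails and B takes its default branch
    have hisin : PySem.Chars.isIn ['.'] t.toList = false := by
      rw [PySem.Chars.isIn_eq_false_iff]
      simpa [List.singleton_infix_iff] using hdot
    have hcond : PySem.Str.isIn "." t = false := by simp [hisin]
    rw [if_pos hcond]
    have hfail : ∀ cs : List Char,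
        ¬ (PySem.Str.endswith t (String.ofList ('.' :: cs)) = true) := by
      intro cs hc
      exact not_suffix_of_no_dot hdot ((hends _).mp hc)
    rw [if_neg (hfail _), if_neg (hfail _), if_neg (hfail _), if_neg (hfail _),
        if_neg (hfail _), if_neg (hfail _), if_neg (hfail _)]

-- ===== VERDICT (by name: the statement is the Claim_ definition above) =====
theorem obtener_tipo_mime_spec : Claim_equal_obtener_tipo_mime := by
  intro s _
  unfold Spec_obtener_tipo_mime
  exact obtener_tipo_mime_eq s
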